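-- pv_equiv track=rewrite | github.com/test-srm-digi/ml-ai-insight | ml-pipeline/src/vuln_insight/utils/cvss_parser.py | parse_cvss_vector
-- ===== SOURCE A (Python) =====
-- from typing import Dict, Optional
--
-- CVSS_METRICS = {
--     "AV": {"N": "network", "L": "local", "A": "adjacent", "P": "physical"},
--     "AC": {"L": "low", "H": "high"},
--     "PR": {"N": "none", "L": "low", "H": "high"},
--     "UI": {"R": "required", "N": "none"},
--     "S":  {"C": "changed", "U": "unchanged"},
--     "C":  {"N": "none", "L": "low", "H": "high"},
--     "I":  {"N": "none", "L": "low", "H": "high"},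
--     "A":  {"N": "none", "L": "low", "H": "high"},
-- }
--
-- METRIC_PREFIXES = {
--     "AV": "attack_vector",
--     "AC": "attack_complexity",
--     "PR": "privileges_required",
--     "UI": "user_interaction",
--     "S":  "scope",
--     "C":  "confidentiality",
--     "I":  "integrity",
--     "A":  "availability",
-- }
--
-- def parse_cvss_vector(vector_str: Optional[str]) -> Dict[str, int]:
--     """Parse a CVSS v3.x vector string into one-hot binary feature dict.
--
--     Args:
--         vector_str: CVSS vector like "CVSS:3.1/AV:N/AC:H/PR:N/UI:R/S:U/C:L/I:L/A:L"
--
--     Returns: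
--         Dict mapping feature names to 0/1 values. Example:
--         {
--             "attack_vector_network": 1,
--             "attack_vector_local": 0,
--             "attack_vector_adjacent": 0,
--             "attack_vector_physical": 0,
--             "attack_complexity_low": 0,
--             "attack_complexity_high": 1,
--             ...
--         }
--     """
--     features = {}
--
--     # Initialize all features to 0
--     for metric_key, values in CVSS_METRICS.items():
--         prefix = METRIC_PREFIXES[metric_key]
--         for val_name in values.values():
--             features[f"{prefix}_{val_name}"] = 0
--
--     if not vector_str or not isinstance(vector_str, str):
--         return features
--
--     # Strip CVSS version prefix if present
--     parts = vector_str.strip()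
--     if parts.startswith("CVSS:"):
--         # Remove "CVSS:3.1/" prefix
--         slash_idx = parts.find("/")
--         if slash_idx >= 0:
--             parts = parts[slash_idx + 1:]
--         else:
--             return features
--
--     # Parse each metric
--     for segment in parts.split("/"):
--         if ":" not in segment:
--             continue
--         key, val = segment.split(":", 1)
--         key = key.strip().upper()
--         val = val.strip().upper()
--
--         if key in CVSS_METRICS and val in CVSS_METRICS[key]:
--             prefix = METRIC_PREFIXES[key]
--             value_name = CVSS_METRICS[key][val]
--             features[f"{prefix}_{value_name}"] = 1
--
--     return features
-- ===== SOURCE B (Python) =====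
-- from typing import Dict, List, Optional, Tuple
--
-- CVSS_METRICS = {
--     "AV": {"N": "network", "L": "local", "A": "adjacent", "P": "physical"},
--     "AC": {"L": "low", "H": "high"},
--     "PR": {"N": "none", "L": "low", "H": "high"},
--     "UI": {"R": "required", "N": "none"},
--     "S":  {"C": "changed", "U": "unchanged"},
--     "C":  {"N": "none", "L": "low", "H": "high"},
--     "I":  {"N": "none", "L": "low", "H": "high"},
--     "A":  {"N": "none", "L": "low", "H": "high"},
-- }
--
-- METRIC_PREFIXES = {
--     "AV": "attack_vector",
--     "AC": "attack_complexity",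
--     "PR": "privileges_required",
--     "UI": "user_interaction",
--     "S":  "scope",
--     "C":  "confidentiality",
--     "I":  "integrity",
--     "A":  "availability",
-- }
--
--
-- def _segment_pairs(vector_str: Optional[str]) -> List[Tuple[str, str]]:
--     """Extract the raw normalized (KEY, VAL) pairs from the vector.
--
--     No table validation happens here: every ':'-segment contributes its
--     normalized pair; invalid pairs simply never match any table entry later.
--     """
--     if not vector_str or not isinstance(vector_str, str):
--         return []
--     parts = vector_str.strip()
--     if parts.startswith("CVSS:"):
--         slash_idx = parts.find("/")
--         if slash_idx < 0:
--             return []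
--         parts = parts[slash_idx + 1:]
--     pairs = []
--     for segment in parts.split("/"):
--         if ":" in segment:
--             key, val = segment.split(":", 1)
--             pairs.append((key.strip().upper(), val.strip().upper()))
--     return pairs
--
--
-- def parse_cvss_vector(vector_str: Optional[str]) -> Dict[str, int]:
--     pairs = _segment_pairs(vector_str)
--     features = {}
--     for metric_key, values in CVSS_METRICS.items():
--         prefix = METRIC_PREFIXES[metric_key]
--         for code, value_name in values.items():
--             features[f"{prefix}_{value_name}"] = 1 if (metric_key, code) in pairs else 0
--     return features
-- ===== Notes on version B (the rewrite author's own statement) =====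
-- stated objective: alternative
-- what changed: A scans segments, validates each key/value against the metric tables and overwrites 1s into a pre-zeroed dict; B never consults the tables while scanning - it extracts the raw normalized (key,val) pairs in one pass and then builds the output in a single table-driven pass where each feature bit is a membership test of its (metric,code) pair in that list, so the per-segment validation lookups disappear.
import Mathlib
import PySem

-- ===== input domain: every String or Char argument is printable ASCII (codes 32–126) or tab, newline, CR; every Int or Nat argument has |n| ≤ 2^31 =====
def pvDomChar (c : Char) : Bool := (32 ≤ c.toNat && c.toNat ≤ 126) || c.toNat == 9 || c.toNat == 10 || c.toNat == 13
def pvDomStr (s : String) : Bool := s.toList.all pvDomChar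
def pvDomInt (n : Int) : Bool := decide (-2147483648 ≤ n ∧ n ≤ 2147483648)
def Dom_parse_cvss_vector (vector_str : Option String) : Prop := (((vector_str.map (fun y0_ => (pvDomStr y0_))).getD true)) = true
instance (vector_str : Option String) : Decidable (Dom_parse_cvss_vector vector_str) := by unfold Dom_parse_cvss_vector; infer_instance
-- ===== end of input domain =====

-- B inverts A's loop structure: instead of validating each segment against the metric tables and
-- overwriting 1s into a pre-zeroed dict, B extracts the raw normalized (key,val) pairs without any
-- table lookup and then emits every feature in one table-driven pass, each bit being a membership
-- test of its (metric, code) pair in that list (objective: alternative).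

-- Shared module constants (dict literals of the Python module)
def CVSS_METRICS : PySem.Dict String (PySem.Dict String String) :=
  PySem.Dict.ofList [
    ("AV", PySem.Dict.ofList [("N", "network"), ("L", "local"), ("A", "adjacent"), ("P", "physical")]),
    ("AC", PySem.Dict.ofList [("L", "low"), ("H", "high")]),
    ("PR", PySem.Dict.ofList [("N", "none"), ("L", "low"), ("H", "high")]),
    ("UI", PySem.Dict.ofList [("R", "required"), ("N", "none")]),
    ("S",  PySem.Dict.ofList [("C", "changed"), ("U", "unchanged")]),
    ("C",  PySem.Dict.ofList [("N", "none"), ("L", "low"), ("H", "high")]),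
    ("I",  PySem.Dict.ofList [("N", "none"), ("L", "low"), ("H", "high")]),
    ("A",  PySem.Dict.ofList [("N", "none"), ("L", "low"), ("H", "high")])]

def METRIC_PREFIXES : PySem.Dict String String :=
  PySem.Dict.ofList [
    ("AV", "attack_vector"),
    ("AC", "attack_complexity"),
    ("PR", "privileges_required"),
    ("UI", "user_interaction"),
    ("S",  "scope"),
    ("C",  "confidentiality"),
    ("I",  "integrity"),
    ("A",  "availability")]

-- ===== PORT A =====
-- the 'Initialize all features to 0' loop (METRIC_PREFIXES[metric_key]: every metric key is present, so getD "" never fires)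
def pvInitFeatures : PySem.Dict String Int :=
  CVSS_METRICS.items.foldl (fun features mkv =>
    let pfx := (METRIC_PREFIXES.get? mkv.1).getD ""
    mkv.2.values.foldl (fun features val_name =>
      features.insert (pfx ++ "_" ++ val_name) 0) features) PySem.Dict.empty

-- the body of A's 'for segment in parts.split("/")' loop
def pvStepA (features : PySem.Dict String Int) (segment : String) : PySem.Dict String Int :=
  if PySem.Str.isIn ":" segment then
    match PySem.Str.splitMax? segment ":" 1 with
    | some (k0 :: v0 :: _) =>
      let key := PySem.Str.upper (PySem.Str.strip k0)
      let val := PySem.Str.upper (PySem.Str.strip v0)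
      match CVSS_METRICS.get? key with              -- 'key in CVSS_METRICS' + the CVSS_METRICS[key] lookup
      | some values =>
        match values.get? val with                  -- 'val in CVSS_METRICS[key]' + lookup
        | some value_name =>
          features.insert (((METRIC_PREFIXES.get? key).getD "") ++ "_" ++ value_name) 1
        | none => features
      | none => features
    | _ => features                                 -- unreachable: ':' ∈ segment gives exactly 2 parts
  else features

def parse_cvss_vector (vector_str : Option String) : List (String × Int) :=
  let features := pvInitFeatures
  match vector_str with
  | none => features.items                          -- 'not vector_str' (None)
  | some s =>
    if s = "" then features.items                   -- 'not vector_str' ("" is falsy)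
    else
      let parts := PySem.Str.strip s
      let parts? : Option String :=                 -- none models the early 'return features'
        if PySem.Str.startswith parts "CVSS:" then
          let slash_idx := PySem.Str.find parts "/"
          if 0 ≤ slash_idx then some (PySem.Str.slice parts (some (slash_idx + 1)) none)
          else none
        else some parts
      match parts? with
      | none => features.items
      | some parts' =>
        -- split? is some because "/" ≠ ""
        (((PySem.Str.split? parts' "/").getD []).foldl pvStepA features).items

-- ===== PORT B =====
-- body of B's pair-extraction loop in _segment_pairs: no table lookup at all
def pvStepPair (pairs : List (String × String)) (segment : String) : List (String × String) :=
  if PySem.Str.isIn ":" segment then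
    match PySem.Str.splitMax? segment ":" 1 with
    | some (k0 :: v0 :: _) =>
      pairs ++ [(PySem.Str.upper (PySem.Str.strip k0), PySem.Str.upper (PySem.Str.strip v0))]
    | _ => pairs                                    -- unreachable: ':' ∈ segment gives exactly 2 parts
  else pairs

-- B's _segment_pairs
def pvSegmentPairs (vector_str : Option String) : List (String × String) :=
  match vector_str with
  | none => []
  | some s =>
    if s = "" then []
    else
      let parts := PySem.Str.strip s
      let go : String → List (String × String) := fun ps =>
        ((PySem.Str.split? ps "/").getD []).foldl pvStepPair []
      if PySem.Str.startswith parts "CVSS:" then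
        let slash_idx := PySem.Str.find parts "/"
        if slash_idx < 0 then []
        else go (PySem.Str.slice parts (some (slash_idx + 1)) none)
      else go parts

def parse_cvss_vector_alt (vector_str : Option String) : List (String × Int) :=
  let pairs := pvSegmentPairs vector_str
  -- B's table-driven emission: for each metric and (code, value_name), a membership test over pairs
  (CVSS_METRICS.items.foldl (fun features mkv =>
    let pfx := (METRIC_PREFIXES.get? mkv.1).getD ""
    mkv.2.items.foldl (fun features cv =>
      features.insert (pfx ++ "_" ++ cv.2)
        (if (mkv.1, cv.1) ∈ pairs then (1 : Int) else 0)) features) PySem.Dict.empty).items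

-- ===== PRECONDITION & SPEC =====
def Spec_parse_cvss_vector (vector_str : Option String) (out : List (String × Int)) : Prop := out = parse_cvss_vector_alt vector_str
instance (vector_str : Option String) (out : List (String × Int)) : Decidable (Spec_parse_cvss_vector vector_str out) := by unfold Spec_parse_cvss_vector; infer_instance

-- ===== CLAIM =====
def Claim_equal_parse_cvss_vector : Prop := ∀ (vector_str : Option String), Dom_parse_cvss_vector vector_str → Spec_parse_cvss_vector vector_str (parse_cvss_vector vector_str)

-- ===== LEMMAS AND PROOFS =====

-- feature name of a metric key and value name
def pvName (metric_key value_name : String) : String :=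
  ((METRIC_PREFIXES.get? metric_key).getD "") ++ "_" ++ value_name

-- the 22 table entries ((metric, code), feature name), flattened in table order
def pvTriples : List ((String × String) × String) :=
  CVSS_METRICS.items.flatMap (fun mkv =>
    mkv.2.items.map (fun cv => ((mkv.1, cv.1), pvName mkv.1 cv.2)))

-- the normalized (KEY, VAL) pair of a segment, if it contains ':'
def pvSegPair? (segment : String) : Option (String × String) :=
  if PySem.Str.isIn ":" segment then
    match PySem.Str.splitMax? segment ":" 1 with
    | some (k0 :: v0 :: _) =>
      some (PySem.Str.upper (PySem.Str.strip k0), PySem.Str.upper (PySem.Str.strip v0))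
    | _ => none
  else none

-- the feature name a pair selects through the tables, if valid
def pvLook (p : String × String) : Option String :=
  match CVSS_METRICS.get? p.1 with
  | some values => (values.get? p.2).map (fun vn => pvName p.1 vn)
  | none => none

-- the items of B's emission fold, as a map over the triples
def pvEmitP (P : List (String × String)) : List (String × Int) :=
  pvTriples.map (fun t => (t.2, if t.1 ∈ P then (1 : Int) else 0))

theorem pvStepA_eq (d : PySem.Dict String Int) (seg : String) :
    pvStepA d seg = ((pvSegPair? seg).bind pvLook).elim d (fun f => d.insert f 1) := by
  unfold pvStepA pvSegPair?
  by_cases h : PySem.Str.isIn ":" seg = true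
  · rw [if_pos h, if_pos h]
    rcases hsp : PySem.Str.splitMax? seg ":" 1 with _ | (_ | ⟨k0, _ | ⟨v0, rest⟩⟩)
    · rfl
    · rfl
    · rfl
    · dsimp only [Option.bind]
      unfold pvLook
      dsimp only
      rcases hg1 : CVSS_METRICS.get? (PySem.Str.upper (PySem.Str.strip k0)) with _ | values
      · rfl
      · dsimp only
        rcases hg2 : values.get? (PySem.Str.upper (PySem.Str.strip v0)) with _ | vn
        · rfl
        · rfl
  · rw [if_neg h, if_neg h]
    rfl

theorem pvStepPair_eq (P : List (String × String)) (seg : String) :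
    pvStepPair P seg = (pvSegPair? seg).elim P (fun p => P ++ [p]) := by
  unfold pvStepPair pvSegPair?
  split
  · split <;> rfl
  · rfl

theorem pvLook_triples : ∀ t ∈ pvTriples, pvLook t.1 = some t.2 := by decide

theorem pvTriplesNames_nodup : (pvTriples.map (fun t => t.2)).Nodup := by decide

theorem pvLook_mem (p : String × String) (f : String) (hf : pvLook p = some f) :
    (p, f) ∈ pvTriples := by
  unfold pvLook at hf
  rcases hg1 : CVSS_METRICS.get? p.1 with _ | values
  · rw [hg1] at hf; cases hf
  · rw [hg1] at hf; dsimp only at hf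
    rcases hg2 : values.get? p.2 with _ | vn
    · rw [hg2] at hf; cases hf
    · rw [hg2] at hf
      simp only [Option.map_some, Option.some.injEq] at hf
      subst hf
      have h1 := PySem.Dict.mem_items_of_get?_eq_some _ hg1
      have h2 := PySem.Dict.mem_items_of_get?_eq_some _ hg2
      unfold pvTriples
      refine List.mem_flatMap.mpr ⟨(p.1, values), h1, ?_⟩
      exact List.mem_map.mpr ⟨(p.2, vn), h2, rfl⟩

-- a triple's name determines the triple (names are distinct)
theorem pvTriples_inj (t u : (String × String) × String)
    (ht : t ∈ pvTriples) (hu : u ∈ pvTriples) (h : t.2 = u.2) : t = u :=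
  List.inj_on_of_nodup_map pvTriplesNames_nodup ht hu h

-- one segment step preserves the items–emission relation
theorem pvStep_inv (d : PySem.Dict String Int) (P : List (String × String)) (seg : String)
    (hd : d.items = pvEmitP P) : (pvStepA d seg).items = pvEmitP (pvStepPair P seg) := by
  rw [pvStepA_eq, pvStepPair_eq]
  rcases hsp : pvSegPair? seg with _ | p
  · simpa using hd
  · simp only [Option.elim_some]
    rcases hlk : pvLook p with _ | f
    · -- invalid pair: A unchanged; p matches no triple, so emission is unchanged too
      simp only [Option.bind_some, hlk, Option.elim_none]
      rw [hd]
      unfold pvEmitP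
      refine List.map_congr_left ?_
      intro t htm
      have : t.1 ≠ p := fun h => by rw [← h, pvLook_triples t htm] at hlk; cases hlk
      simp [this]
    · -- valid pair: A writes 1 at f; exactly the triple ((p), f) flips
      simp only [Option.bind_some, hlk, Option.elim_some]
      have htp : (p, f) ∈ pvTriples := pvLook_mem p f hlk
      have hkeys : d.keys = pvTriples.map (fun t => t.2) := by
        simp only [PySem.Dict.keys, hd, pvEmitP, List.map_map]
        rfl
      have hc : d.contains f = true := by
        refine (PySem.Dict.contains_iff_mem_keys d f).mpr ?_
        rw [hkeys]
        exact List.mem_map.mpr ⟨(p, f), htp, rfl⟩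
      rw [PySem.Dict.items_insert_of_contains d 1 hc, hd]
      unfold pvEmitP
      rw [List.map_map]
      refine List.map_congr_left ?_
      intro t htm
      simp only [Function.comp_apply]
      by_cases hname : t.2 = f
      · have : t = (p, f) := pvTriples_inj t (p, f) htm htp hname
        subst this
        simp
      · have hne : t.1 ≠ p := by
          intro h
          have := pvLook_triples t htm
          rw [h, hlk] at this
          exact hname (Option.some.injEq _ _ ▸ this.symm ▸ rfl)
        rw [if_neg (by simp [hname])]
        simp [hne]

theorem pvFold_inv (segs : List String) (d : PySem.Dict String Int) (P : List (String × String))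
    (hd : d.items = pvEmitP P) :
    (segs.foldl pvStepA d).items = pvEmitP (segs.foldl pvStepPair P) := by
  induction segs generalizing d P with
  | nil => simpa using hd
  | cons seg segs ih =>
    simp only [List.foldl_cons]
    exact ih _ _ (pvStep_inv d P seg hd)

-- B's emission fold over the table produces exactly pvEmitP
theorem pvBackend_emit (P : List (String × String)) :
    (CVSS_METRICS.items.foldl (fun features mkv =>
      let pfx := (METRIC_PREFIXES.get? mkv.1).getD ""
      mkv.2.items.foldl (fun features cv =>
        features.insert (pfx ++ "_" ++ cv.2)
          (if (mkv.1, cv.1) ∈ P then (1 : Int) else 0)) features) PySem.Dict.empty).items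
      = pvEmitP P := by
  have hflat :
      (CVSS_METRICS.items.foldl (fun features mkv =>
        let pfx := (METRIC_PREFIXES.get? mkv.1).getD ""
        mkv.2.items.foldl (fun features cv =>
          features.insert (pfx ++ "_" ++ cv.2)
            (if (mkv.1, cv.1) ∈ P then (1 : Int) else 0)) features) PySem.Dict.empty)
      = pvTriples.foldl (fun d t => d.insert t.2 (if t.1 ∈ P then (1 : Int) else 0))
          PySem.Dict.empty := by
    rw [pvTriples, List.foldl_flatMap]
    simp only [List.foldl_map]
    rfl
  rw [hflat]
  rw [PySem.Dict.items_foldl_insert_fresh pvTriples (fun t => t.2)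
        (fun t => if t.1 ∈ P then (1 : Int) else 0) PySem.Dict.empty
        (fun a _ => PySem.Dict.contains_empty _) pvTriplesNames_nodup]
  rfl

theorem pvInit_emit : pvInitFeatures.items = pvEmitP [] := by decide

-- ===== VERDICT =====
theorem parse_cvss_vector_spec : Claim_equal_parse_cvss_vector := by
  intro vector_str _
  unfold Spec_parse_cvss_vector parse_cvss_vector parse_cvss_vector_alt pvSegmentPairs
  rw [pvBackend_emit]
  rcases vector_str with _ | s
  · exact pvInit_emit
  · by_cases hs : s = "" <;> simp only [hs, if_pos, reduceIte]
    · exact pvInit_emit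
    · by_cases hcv : PySem.Str.startswith (PySem.Str.strip s) "CVSS:" <;>
        simp only [hcv, if_pos]
      · by_cases hsl : 0 ≤ PySem.Str.find (PySem.Str.strip s) "/"
        · have hsl' : ¬ PySem.Str.find (PySem.Str.strip s) "/" < 0 := by omega
          simp only [hsl, hsl', if_pos, reduceIte]
          exact pvFold_inv _ _ _ pvInit_emit
        · have hsl' : PySem.Str.find (PySem.Str.strip s) "/" < 0 := by omega
          simp only [hsl, hsl', if_pos, reduceIte]
          exact pvInit_emit
      · exact pvFold_inv _ _ _ pvInit_emit
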